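-- pv_equiv track=rewrite | github.com/christest420/ordrestatus-api | api.py | hent_siste_hendelse
-- ===== SOURCE A (Python) =====
-- def hent_siste_hendelse(checkpoint_full):
--     hendelser = [h.strip() for h in checkpoint_full.split("-") if h.strip()]
--     ekskluder = [
--         "plukkliste opprettet", "plukkliste utskrevet", "ordre opprettet",
--         "plukkliste slettet", "ordrelinje slettet", "leveranse godkjent til fakturering",
--         "faktura produsert", "faktura utskrevet"
--     ]
--     hendelser = [h for h in hendelser if h.lower() not in ekskluder]
--     return hendelser[-1] if hendelser else "Ingen nye hendelser"
-- ===== SOURCE B (Python) =====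
-- def hent_siste_hendelse(checkpoint_full):
--     ekskluder = {
--         "plukkliste opprettet", "plukkliste utskrevet", "ordre opprettet",
--         "plukkliste slettet", "ordrelinje slettet", "leveranse godkjent til fakturering",
--         "faktura produsert", "faktura utskrevet"
--     }
--     for part in reversed(checkpoint_full.split("-")):
--         h = part.strip()
--         if h and h.lower() not in ekskluder:
--             return h
--     return "Ingen nye hendelser"
-- ===== Notes on version B (the rewrite author's own statement) =====
-- stated objective: simpler
-- what changed: Replaces the build-two-filtered-lists-then-index-[-1] strategy with a single early-exit scan over the dash parts in reverse order, returning the first stripped, non-empty, non-excluded part (exclusions kept in a set).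
import Mathlib
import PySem

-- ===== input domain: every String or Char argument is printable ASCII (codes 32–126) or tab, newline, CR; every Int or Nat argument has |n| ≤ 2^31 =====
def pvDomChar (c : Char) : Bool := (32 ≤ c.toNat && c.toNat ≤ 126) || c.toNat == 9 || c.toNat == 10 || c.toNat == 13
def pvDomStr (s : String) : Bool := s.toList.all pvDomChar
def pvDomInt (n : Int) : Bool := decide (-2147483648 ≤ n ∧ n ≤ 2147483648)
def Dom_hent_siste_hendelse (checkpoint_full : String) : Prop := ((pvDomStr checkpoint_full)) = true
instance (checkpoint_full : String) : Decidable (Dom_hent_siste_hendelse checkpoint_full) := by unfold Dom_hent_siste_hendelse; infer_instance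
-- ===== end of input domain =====

-- ===== PORT A =====
-- the excluded event names (module constant inside A)
def pvEks : List String :=
  ["plukkliste opprettet", "plukkliste utskrevet", "ordre opprettet",
   "plukkliste slettet", "ordrelinje slettet", "leveranse godkjent til fakturering",
   "faktura produsert", "faktura utskrevet"]

def hent_siste_hendelse (checkpoint_full : String) : String :=
  let parts : List String := (PySem.Str.split? checkpoint_full "-").getD []  -- sep "-" ≠ "", so never none
  let hendelser : List String :=
    (parts.filter (fun h => PySem.Str.strip h != "")).map PySem.Str.strip
  let hendelser2 : List String :=
    hendelser.filter (fun h => !(pvEks.contains (PySem.Str.lower h)))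
  match hendelser2.getLast? with
  | some h => h
  | none => "Ingen nye hendelser"

-- ===== PORT B =====
-- B keeps the exclusions in a set
def pvEksSet : PySem.Set String := PySem.Set.ofList pvEks

-- early-exit scan: first part (of the reversed list) whose strip is non-empty and not excluded
def pvGo : List String → String
  | [] => "Ingen nye hendelser"
  | p :: rest =>
      let h := PySem.Str.strip p
      if h != "" && !(pvEksSet.contains (PySem.Str.lower h)) then h else pvGo rest

def hent_siste_hendelse_alt (checkpoint_full : String) : String :=
  pvGo (((PySem.Str.split? checkpoint_full "-").getD []).reverse)

-- ===== PRECONDITION & SPEC =====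
def Spec_hent_siste_hendelse (checkpoint_full : String) (out : String) : Prop := out = hent_siste_hendelse_alt checkpoint_full
instance (checkpoint_full : String) (out : String) : Decidable (Spec_hent_siste_hendelse checkpoint_full out) := by unfold Spec_hent_siste_hendelse; infer_instance

-- ===== CLAIM =====
def Claim_equal_hent_siste_hendelse : Prop := ∀ (checkpoint_full : String), Dom_hent_siste_hendelse checkpoint_full → Spec_hent_siste_hendelse checkpoint_full (hent_siste_hendelse checkpoint_full)

-- ===== LEMMAS AND PROOFS =====
lemma pvEksSet_eq : pvEksSet = pvEks := by decide

-- B's scan returns the first element of A's filtered view of its argument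
lemma pvGo_eq (l : List String) :
    pvGo l =
      ((((l.filter (fun h => PySem.Str.strip h != "")).map PySem.Str.strip).filter
        (fun h => !(pvEks.contains (PySem.Str.lower h)))).head?).getD "Ingen nye hendelser" := by
  induction l with
  | nil => rfl
  | cons x rest ih =>
      by_cases hp : PySem.Str.strip x = ""
      · simp [pvGo, hp, pvEksSet_eq, ih]
      · by_cases hq : PySem.Str.lower (PySem.Str.strip x) ∈ pvEks
        · simp [pvGo, hp, hq, pvEksSet_eq, ih]
        · simp [pvGo, hp, hq, pvEksSet_eq]

-- ===== VERDICT =====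
theorem hent_siste_hendelse_spec : Claim_equal_hent_siste_hendelse := by
  intro s _
  unfold Spec_hent_siste_hendelse hent_siste_hendelse hent_siste_hendelse_alt
  rw [pvGo_eq]
  simp only [List.filter_reverse, List.map_reverse, List.head?_reverse]
  cases h : (((((PySem.Str.split? s "-").getD []).filter (fun h => PySem.Str.strip h != "")).map PySem.Str.strip).filter
      (fun h => !(pvEks.contains (PySem.Str.lower h)))).getLast? <;> rfl
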